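-- pv_equiv track=rewrite | github.com/lapssh/advent_of_code | 2021/day11/day11-giant_octopus.py | calc_flashes
-- ===== SOURCE A (Python) =====
-- def calc_flashes(data, steps=1):
--     for i, x in enumerate(data):
--         for j, y in enumerate(x):
--             # если 9 - взрываем всех
--             if data[i][j] == 9:
--                 data[i][j] = 0
--                 # взрываем LT
--                 if i-1 >= 0 and j-1 >=0:
--                     data[i-1][j-1] += 1
--
--             elif data[i][j] ==0:
--                 continue
--             else:
--                 data[i][j] += 1
--             # меняем
--     return data
-- ===== SOURCE B (Python) =====
-- def calc_flashes(data, steps=1):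
--     # Snapshot-then-apply: every cell's final value depends only on the original
--     # grid (A's increments always target an earlier cell), so compute each cell
--     # from the snapshot in one write pass.
--     snap = [row[:] for row in data]
--     for i, row in enumerate(data):
--         for j in range(len(row)):
--             v = snap[i][j]
--             nv = 0 if v == 9 or v == 0 else v + 1
--             if i + 1 < len(snap) and j + 1 < len(snap[i + 1]) and snap[i + 1][j + 1] == 9:
--                 nv += 1
--             row[j] = nv
--     return data
-- ===== Notes on version B (the rewrite author's own statement) =====
-- stated objective: alternative
-- what changed: B snapshots the grid and computes every cell in one write pass from original values (transform + guarded lookahead at (i+1,j+1)), replacing A's order-sensitive in-place mutation that pushes increments back to already-visited cells.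
import Mathlib
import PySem

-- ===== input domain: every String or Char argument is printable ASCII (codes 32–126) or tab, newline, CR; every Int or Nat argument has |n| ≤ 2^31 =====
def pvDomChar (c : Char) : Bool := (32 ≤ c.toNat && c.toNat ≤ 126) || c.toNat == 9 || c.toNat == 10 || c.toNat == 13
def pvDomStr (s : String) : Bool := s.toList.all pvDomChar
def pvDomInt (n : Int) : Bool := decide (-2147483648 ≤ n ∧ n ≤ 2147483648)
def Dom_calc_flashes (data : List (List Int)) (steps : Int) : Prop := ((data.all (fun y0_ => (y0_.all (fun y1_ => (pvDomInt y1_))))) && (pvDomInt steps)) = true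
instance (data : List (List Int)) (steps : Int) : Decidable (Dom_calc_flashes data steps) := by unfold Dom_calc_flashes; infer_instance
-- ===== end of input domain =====

-- B snapshots the grid and recomputes every cell from original values in one pass; A mutates in place.
-- A mutates `data` in place and returns it; the equivalence proved here is about the RETURN value.

-- ===== PORT A =====
-- one body of A's inner loop: read data[i][j], branch exactly as A does
def pvStepCell (g : List (List Int)) (i j : Nat) : List (List Int) :=
  if (g.getD i []).getD j 0 = 9 then
    let g1 := g.set i ((g.getD i []).set j 0)
    if 1 ≤ i ∧ 1 ≤ j then
      g1.set (i-1) ((g1.getD (i-1) []).set (j-1) ((g1.getD (i-1) []).getD (j-1) 0 + 1))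
    else g1
  else if (g.getD i []).getD j 0 = 0 then g
  else g.set i ((g.getD i []).set j ((g.getD i []).getD j 0 + 1))

def calc_flashes (data : List (List Int)) (steps : Int) : List (List Int) :=
  (List.range data.length).foldl (fun g i =>
    (List.range ((g.getD i []).length)).foldl (fun h j => pvStepCell h i j) g) data

-- ===== PORT B =====
def pvTransform (v : Int) : Int := if v = 9 ∨ v = 0 then 0 else v + 1

def calc_flashes_alt (data : List (List Int)) (steps : Int) : List (List Int) :=
  data.mapIdx (fun i row => row.mapIdx (fun j v =>
    let nv := pvTransform v
    if i + 1 < data.length ∧ j + 1 < (data.getD (i+1) []).length ∧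
        (data.getD (i+1) []).getD (j+1) 0 = 9 then nv + 1 else nv))

-- ===== PRECONDITION & SPEC =====
-- Pre_ excludes exactly the inputs on which Python A raises IndexError: a 9 at (i,j), i,j ≥ 1, with row i-1 shorter than j.
def Pre_calc_flashes (data : List (List Int)) (steps : Int) : Prop :=
  ∀ i, i < data.length → ∀ j, j < (data.getD i []).length →
    1 ≤ i → 1 ≤ j → (data.getD i []).getD j 0 = 9 → j - 1 < (data.getD (i-1) []).length
instance (data : List (List Int)) (steps : Int) : Decidable (Pre_calc_flashes data steps) := by
  unfold Pre_calc_flashes; infer_instance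

def pvWitness_calc_flashes : List (List Int) × Int := ([[9, 1], [2, 9]], 1)

def Spec_calc_flashes (data : List (List Int)) (steps : Int) (out : List (List Int)) : Prop := out = calc_flashes_alt data steps
instance (data : List (List Int)) (steps : Int) (out : List (List Int)) : Decidable (Spec_calc_flashes data steps out) := by unfold Spec_calc_flashes; infer_instance

-- ===== CLAIM (what is proved, stated in full; the proofs are below) =====
def Claim_equal_calc_flashes : Prop := ∀ (data : List (List Int)) (steps : Int), Dom_calc_flashes data steps → Pre_calc_flashes data steps → Spec_calc_flashes data steps (calc_flashes data steps)

-- ===== LEMMAS AND PROOFS =====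

-- proof-only helpers: B's bonus/row, A's partially-processed rows, and the grid after k outer steps
def pvBonus (next : List Int) (j : Nat) : Int :=
  if j + 1 < next.length ∧ next.getD (j+1) 0 = 9 then 1 else 0

def pvBRow (r next : List Int) : List Int :=
  r.mapIdx (fun j v => pvTransform v + pvBonus next j)

def pvRMap (r : List Int) (m : Nat) : List Int :=
  (r.take m).map pvTransform ++ r.drop m

def pvPApp (p r : List Int) (m : Nat) : List Int :=
  p.mapIdx (fun t w => w + if t + 1 < m ∧ r.getD (t+1) 0 = 9 then 1 else 0)

def pvGrid (data : List (List Int)) (k : Nat) : List (List Int) :=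
  data.mapIdx (fun t r =>
    if t + 1 < k then pvBRow r (data.getD (t+1) [])
    else if t + 1 = k then r.map pvTransform else r)

theorem pv_getD_set_self {a : Type} (g : List a) (i : Nat) (hi : i < g.length) (x d : a) :
    (g.set i x).getD i d = x := by
  simp [List.getD_eq_getElem?_getD, List.getElem?_set, hi]

theorem pv_getD_set_ne {a : Type} (g : List a) (i t : Nat) (h : i ≠ t) (x : a) (d : a) :
    (g.set i x).getD t d = g.getD t d := by
  simp [List.getD_eq_getElem?_getD, List.getElem?_set, h]

theorem pv_set_self {a : Type} (g : List a) (i : Nat) (h : i < g.length) (d : a) :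
    g.set i (g.getD i d) = g := by
  simp [List.getD_eq_getElem?_getD, List.getElem?_eq_getElem h, List.set_getElem_self]

theorem pvTransform_nine {v : Int} (h : v = 9) : pvTransform v = 0 := by
  subst h; simp [pvTransform]

theorem pvTransform_zero {v : Int} (h : v = 0) : pvTransform v = 0 := by
  subst h; simp [pvTransform]

theorem pvTransform_other {v : Int} (h9 : v ≠ 9) (h0 : v ≠ 0) : pvTransform v = v + 1 := by
  simp [pvTransform, h9, h0]

theorem pv_rmap_zero (r : List Int) : pvRMap r 0 = r := by simp [pvRMap]

theorem pv_rmap_length (r : List Int) (m : Nat) : (pvRMap r m).length = r.length := by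
  simp [pvRMap]; omega

theorem pv_rmap_full (r : List Int) : pvRMap r r.length = r.map pvTransform := by
  simp [pvRMap]

theorem pv_rmap_getD (r : List Int) (m : Nat) (h : m < r.length) :
    (pvRMap r m).getD m 0 = r.getD m 0 := by
  have hmin : min m r.length = m := by omega
  simp [pvRMap, List.getD_eq_getElem?_getD, List.getElem?_append, List.length_take, hmin,
    List.getElem?_drop, List.getElem?_eq_getElem h]

theorem pv_rmap_set (r : List Int) (m : Nat) (h : m < r.length) (x : Int)
    (hx : x = pvTransform (r.getD m 0)) : (pvRMap r m).set m x = pvRMap r (m+1) := by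
  have hdrop : r.drop m = r[m] :: r.drop (m+1) := List.drop_eq_getElem_cons h
  have htake : r.take (m+1) = r.take m ++ [r[m]] := by
    rw [List.take_add_one]; simp [List.getElem?_eq_getElem h]
  have hlen : ((r.take m).map pvTransform).length = m := by simp [List.length_take]; omega
  have hgd : r.getD m 0 = r[m] := by
    simp [List.getD_eq_getElem?_getD, List.getElem?_eq_getElem h]
  have hmin : min m r.length = m := by omega
  rw [pvRMap, hdrop, pvRMap, htake, List.map_append,
    List.set_append_right _ _ (le_of_eq hlen)]
  rw [hlen, Nat.sub_self, List.set_cons_zero]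
  simp [hx, hgd, List.getElem?_eq_getElem h]

theorem pv_rmap_succ_eq (r : List Int) (m : Nat) (h : m < r.length)
    (hv : pvTransform (r.getD m 0) = r.getD m 0) : pvRMap r (m+1) = pvRMap r m := by
  rw [← pv_rmap_set r m h (r.getD m 0) hv.symm, ← pv_rmap_getD r m h,
    pv_set_self _ m (by rw [pv_rmap_length]; omega)]

theorem pv_papp_zero (p r : List Int) : pvPApp p r 0 = p := by
  apply List.ext_getElem (by simp [pvPApp])
  intro t h1 h2
  simp [pvPApp]

theorem pv_papp_succ_skip (p r : List Int) (m : Nat) (h : m = 0 ∨ r.getD m 0 ≠ 9) :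
    pvPApp p r (m+1) = pvPApp p r m := by
  apply List.ext_getElem (by simp [pvPApp])
  intro t h1 h2
  simp only [pvPApp, List.getElem_mapIdx]
  by_cases hc : r.getD (t+1) 0 = 9
  · have hne : t + 1 ≠ m := by
      rcases h with h | h
      · omega
      · intro he; exact h (he ▸ hc)
    simp only [show (t + 1 < m + 1) ↔ (t + 1 < m) from by omega]
  · simp only [List.getD_eq_getElem?_getD] at hc
    simp [hc]

theorem pv_papp_succ_nine (p r : List Int) (m : Nat) (hm : 1 ≤ m) (h9 : r.getD m 0 = 9) :
    (pvPApp p r m).set (m-1) ((pvPApp p r m).getD (m-1) 0 + 1) = pvPApp p r (m+1) := by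
  apply List.ext_getElem (by simp [pvPApp])
  intro t h1 h2
  rw [List.getElem_set]
  have h2' : t < p.length := by simpa [pvPApp] using h2
  by_cases ht : m - 1 = t
  · have htm : t + 1 = m := by omega
    rw [if_pos ht]
    have hval : (pvPApp p r m).getD (m-1) 0 = p[t]'h2' := by
      rw [ht]
      simp only [List.getD_eq_getElem?_getD, pvPApp, List.getElem?_mapIdx,
        List.getElem?_eq_getElem h2']
      simp [show ¬ (t + 1 < m) from by omega]
    rw [hval]
    simp only [pvPApp, List.getElem_mapIdx]
    rw [if_pos ⟨by omega, by rw [htm]; exact h9⟩]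
  · rw [if_neg ht]
    simp only [pvPApp, List.getElem_mapIdx]
    have hne : t + 1 ≠ m := by omega
    simp only [show (t + 1 < m + 1) ↔ (t + 1 < m) from by omega]

theorem pv_papp_full (p r : List Int) :
    pvPApp (p.map pvTransform) r r.length = pvBRow p r := by
  apply List.ext_getElem (by simp [pvPApp, pvBRow])
  intro t h1 h2
  have h2' : t < p.length := by simpa [pvBRow] using h2
  simp [pvPApp, pvBRow, pvBonus, List.getElem_mapIdx]

theorem pv_brow_nil (r : List Int) : pvBRow r [] = r.map pvTransform := by
  apply List.ext_getElem (by simp [pvBRow])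
  intro t h1 h2
  simp [pvBRow, pvBonus]

-- inner loop over row i (i ≥ 1) after m steps
theorem pv_inner_pos (g0 : List (List Int)) (i : Nat) (hi : i < g0.length) (h1 : 1 ≤ i) :
    ∀ m, m ≤ (g0.getD i []).length →
      (List.range m).foldl (fun h j => pvStepCell h i j) g0
        = (g0.set i (pvRMap (g0.getD i []) m)).set (i-1)
            (pvPApp (g0.getD (i-1) []) (g0.getD i []) m) := by
  intro m
  induction m with
  | zero =>
    intro _
    rw [List.range_zero, List.foldl_nil, pv_rmap_zero, pv_papp_zero,
      pv_set_self g0 i hi, pv_set_self g0 (i-1) (by omega)]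
  | succ m ih =>
    intro hm
    have hmlt : m < (g0.getD i []).length := by omega
    rw [List.range_succ, List.foldl_append, ih (by omega), List.foldl_cons, List.foldl_nil]
    set r := g0.getD i [] with hr
    set p := g0.getD (i-1) [] with hp
    set gm := (g0.set i (pvRMap r m)).set (i-1) (pvPApp p r m) with hgm
    have hine : i - 1 ≠ i := by omega
    have hgi : gm.getD i [] = pvRMap r m := by
      rw [hgm, pv_getD_set_ne _ _ _ hine, pv_getD_set_self _ _ hi]
    have hgv : (pvRMap r m).getD m 0 = r.getD m 0 := pv_rmap_getD r m hmlt
    have hswap : ∀ x, gm.set i x = (g0.set i x).set (i-1) (pvPApp p r m) := by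
      intro x
      rw [hgm, List.set_comm _ _ hine, List.set_set]
    unfold pvStepCell
    rw [hgi, hgv]
    by_cases h9 : r.getD m 0 = 9
    · have hset : (pvRMap r m).set m 0 = pvRMap r (m+1) :=
        pv_rmap_set r m hmlt 0 (pvTransform_nine h9).symm
      rw [if_pos h9]
      by_cases hm1 : 1 ≤ m
      · rw [if_pos ⟨h1, hm1⟩]
        simp only [hset, hswap]
        have hgp1 : ((g0.set i (pvRMap r (m+1))).set (i-1) (pvPApp p r m)).getD (i-1) [] =
            pvPApp p r m := pv_getD_set_self _ _ (by simp; omega) _ _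
        rw [hgp1, List.set_set, pv_papp_succ_nine p r m hm1 h9]
      · have hm0 : m = 0 := by omega
        rw [if_neg (by omega : ¬ (1 ≤ i ∧ 1 ≤ m))]
        simp only [hset, hswap]
        rw [pv_papp_succ_skip p r m (Or.inl hm0)]
    · rw [if_neg h9]
      by_cases h0 : r.getD m 0 = 0
      · rw [if_pos h0, pv_rmap_succ_eq r m hmlt ((pvTransform_zero h0).trans h0.symm),
          pv_papp_succ_skip p r m (Or.inr h9)]
      · have hset : (pvRMap r m).set m (r.getD m 0 + 1) = pvRMap r (m+1) :=
          pv_rmap_set r m hmlt _ (pvTransform_other h9 h0).symm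
        rw [if_neg h0]
        simp only [hset, hswap]
        rw [pv_papp_succ_skip p r m (Or.inr h9)]

-- inner loop over row 0 after m steps
theorem pv_inner_zero (g0 : List (List Int)) (h0 : 0 < g0.length) :
    ∀ m, m ≤ (g0.getD 0 []).length →
      (List.range m).foldl (fun h j => pvStepCell h 0 j) g0
        = g0.set 0 (pvRMap (g0.getD 0 []) m) := by
  intro m
  induction m with
  | zero =>
    intro _
    rw [List.range_zero, List.foldl_nil, pv_rmap_zero, pv_set_self g0 0 h0]
  | succ m ih =>
    intro hm
    have hmlt : m < (g0.getD 0 []).length := by omega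
    rw [List.range_succ, List.foldl_append, ih (by omega), List.foldl_cons, List.foldl_nil]
    set r := g0.getD 0 [] with hr
    set gm := g0.set 0 (pvRMap r m) with hgm
    have hgi : gm.getD 0 [] = pvRMap r m := pv_getD_set_self _ _ h0 _ _
    have hgv : (pvRMap r m).getD m 0 = r.getD m 0 := pv_rmap_getD r m hmlt
    unfold pvStepCell
    rw [hgi, hgv]
    by_cases h9 : r.getD m 0 = 9
    · have hset : (pvRMap r m).set m 0 = pvRMap r (m+1) :=
        pv_rmap_set r m hmlt 0 (pvTransform_nine h9).symm
      rw [if_pos h9, if_neg (by omega : ¬ ((1:Nat) ≤ 0 ∧ 1 ≤ m))]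
      simp only [hset, hgm, List.set_set]
    · rw [if_neg h9]
      by_cases hz : r.getD m 0 = 0
      · rw [if_pos hz, pv_rmap_succ_eq r m hmlt ((pvTransform_zero hz).trans hz.symm)]
      · have hset : (pvRMap r m).set m (r.getD m 0 + 1) = pvRMap r (m+1) :=
          pv_rmap_set r m hmlt _ (pvTransform_other h9 hz).symm
        rw [if_neg hz]
        simp only [hset, hgm, List.set_set]

theorem pv_grid_length (data : List (List Int)) (k : Nat) :
    (pvGrid data k).length = data.length := by simp [pvGrid]

theorem pv_grid_zero (data : List (List Int)) : pvGrid data 0 = data := by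
  apply List.ext_getElem (by simp [pvGrid])
  intro t h1 h2
  simp [pvGrid]

theorem pv_grid_getD_self (data : List (List Int)) (k : Nat) (hk : k < data.length) :
    (pvGrid data k).getD k [] = data.getD k [] := by
  simp only [List.getD_eq_getElem?_getD, pvGrid, List.getElem?_mapIdx,
    List.getElem?_eq_getElem hk]
  simp

theorem pv_grid_getD_pred (data : List (List Int)) (k : Nat) (h1 : 1 ≤ k)
    (hk : k - 1 < data.length) :
    (pvGrid data k).getD (k-1) [] = (data.getD (k-1) []).map pvTransform := by
  simp only [List.getD_eq_getElem?_getD, pvGrid, List.getElem?_mapIdx,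
    List.getElem?_eq_getElem hk]
  have hc1 : ¬ (k - 1 + 1 < k) := by omega
  have hc2 : k - 1 + 1 = k := by omega
  simp [hc1, hc2, List.getElem?_eq_getElem hk]

-- pushing one processed row into the grid characterisation, k ≥ 1
theorem pv_grid_succ_pos (data : List (List Int)) (k : Nat) (hk : k < data.length) (h1 : 1 ≤ k) :
    ((pvGrid data k).set k ((data.getD k []).map pvTransform)).set (k-1)
        (pvPApp ((data.getD (k-1) []).map pvTransform) (data.getD k []) (data.getD k []).length)
      = pvGrid data (k+1) := by
  rw [pv_papp_full]
  apply List.ext_getElem (by simp [pvGrid])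
  intro t h2 h3
  have ht : t < data.length := by simpa [pvGrid] using h3
  rw [List.getElem_set, List.getElem_set]
  by_cases htk1 : k - 1 = t
  · rw [if_pos htk1]
    have hgd : data.getD (k-1) [] = data[t] := by
      rw [htk1]; simp [List.getD_eq_getElem?_getD, List.getElem?_eq_getElem ht]
    have hgd2 : data.getD k [] = data.getD (t+1) [] := by
      have : k = t + 1 := by omega
      rw [this]
    simp only [pvGrid, List.getElem_mapIdx]
    rw [if_pos (by omega), hgd, hgd2]
  · rw [if_neg htk1]
    by_cases htk : k = t
    · rw [if_pos htk]
      simp only [pvGrid, List.getElem_mapIdx]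
      rw [if_neg (by omega), if_pos (by omega)]
      have hge : data.getD k [] = data[t] := by
        rw [htk]; simp [List.getD_eq_getElem?_getD, List.getElem?_eq_getElem ht]
      rw [hge]
    · rw [if_neg htk]
      simp only [pvGrid, List.getElem_mapIdx]
      simp only [show (t + 1 < k + 1) ↔ (t + 1 < k) from by omega]
      rw [if_neg (by omega : ¬ t + 1 = k + 1)]
      have hne : ¬ t + 1 = k := by omega
      by_cases hlt : t + 1 < k <;> simp [hlt, hne]

-- pushing row 0 into the grid characterisation
theorem pv_grid_succ_zero (data : List (List Int)) (h0 : 0 < data.length) :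
    (pvGrid data 0).set 0 ((data.getD 0 []).map pvTransform) = pvGrid data 1 := by
  rw [pv_grid_zero]
  apply List.ext_getElem (by simp [pvGrid])
  intro t h2 h3
  have ht : t < data.length := by simpa using h2
  rw [List.getElem_set]
  by_cases ht0 : 0 = t
  · subst ht0
    rw [if_pos rfl]
    simp only [pvGrid, List.getElem_mapIdx]
    simp [List.getD_eq_getElem?_getD, List.getElem?_eq_getElem h0]
  · rw [if_neg ht0]
    simp only [pvGrid, List.getElem_mapIdx]
    simp [show ¬ (t + 1 < 1) from by omega]
    intro h
    exact absurd h.symm ht0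

-- the outer loop after k rows equals the grid characterisation
theorem pv_outer (data : List (List Int)) :
    ∀ k, k ≤ data.length →
      (List.range k).foldl (fun g i =>
        (List.range ((g.getD i []).length)).foldl (fun h j => pvStepCell h i j) g) data
      = pvGrid data k := by
  intro k
  induction k with
  | zero => intro _; rw [List.range_zero, List.foldl_nil, pv_grid_zero]
  | succ k ih =>
    intro hk
    have hk' : k < data.length := by omega
    rw [List.range_succ, List.foldl_append, ih (by omega), List.foldl_cons, List.foldl_nil]
    have hlen : (pvGrid data k).getD k [] = data.getD k [] := pv_grid_getD_self data k hk'
    have hglen : k < (pvGrid data k).length := by rw [pv_grid_length]; omega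
    rw [hlen]
    by_cases h1 : 1 ≤ k
    · rw [pv_inner_pos (pvGrid data k) k hglen h1 _ (by rw [hlen])]
      rw [hlen, pv_grid_getD_pred data k h1 (by omega), pv_rmap_full]
      exact pv_grid_succ_pos data k hk' h1
    · have hk0 : k = 0 := by omega
      subst hk0
      rw [pv_inner_zero (pvGrid data 0) hglen _ (by rw [hlen])]
      rw [hlen, pv_rmap_full]
      exact pv_grid_succ_zero data hk'

-- B's port, characterised row-wise
theorem pv_alt_eq (data : List (List Int)) (steps : Int) :
    calc_flashes_alt data steps = data.mapIdx (fun i r => pvBRow r (data.getD (i+1) [])) := by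
  apply List.ext_getElem (by simp [calc_flashes_alt])
  intro i h1 h2
  have hi : i < data.length := by simpa [calc_flashes_alt] using h1
  simp only [calc_flashes_alt, List.getElem_mapIdx]
  apply List.ext_getElem (by simp [pvBRow])
  intro j h3 h4
  simp only [List.getElem_mapIdx, pvBRow, pvBonus]
  by_cases hin : i + 1 < data.length
  · by_cases hb : j + 1 < (data.getD (i+1) []).length ∧ (data.getD (i+1) []).getD (j+1) 0 = 9
    · rw [if_pos ⟨hin, hb.1, hb.2⟩, if_pos hb]
    · rw [if_neg (by tauto), if_neg hb]
      simp
  · have hnil : data.getD (i+1) [] = [] := by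
      simp [List.getD_eq_getElem?_getD, List.getElem?_eq_none (by omega : data.length ≤ i + 1)]
    rw [if_neg (by tauto), if_neg (by rw [hnil]; simp)]
    simp

-- the fully processed grid is B's result
theorem pv_grid_full (data : List (List Int)) :
    pvGrid data data.length = data.mapIdx (fun i r => pvBRow r (data.getD (i+1) [])) := by
  apply List.ext_getElem (by simp [pvGrid])
  intro t h1 h2
  have ht : t < data.length := by simpa [pvGrid] using h1
  simp only [pvGrid, List.getElem_mapIdx]
  by_cases hlt : t + 1 < data.length
  · rw [if_pos hlt]
  · have heq : t + 1 = data.length := by omega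
    rw [if_neg hlt, if_pos heq]
    have hnil : data.getD (t+1) [] = [] := by
      simp [List.getD_eq_getElem?_getD, List.getElem?_eq_none (by omega : data.length ≤ t + 1)]
    rw [hnil, pv_brow_nil]

theorem pv_main (data : List (List Int)) (steps : Int) :
    calc_flashes data steps = calc_flashes_alt data steps := by
  rw [calc_flashes, pv_outer data data.length (le_refl _), pv_grid_full, pv_alt_eq]

-- ===== VERDICT (by name: the statement is the Claim_ definition above) =====
theorem calc_flashes_spec : Claim_equal_calc_flashes := by
  intro data steps _ _
  unfold Spec_calc_flashes
  exact pv_main data steps
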